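-- pv_equiv track=rewrite | github.com/huangxiaohui1991/trade | scripts/state/reason_codes.py | _prioritize_codes
-- ===== SOURCE A (Python) =====
-- def _dedupe(items: list[str]) -> list[str]:
--     seen = set()
--     result = []
--     for item in items:
--         if not item or item in seen:
--             continue
--         seen.add(item)
--         result.append(item)
--     return result
--
-- def _prioritize_codes(codes: list[str], priority: list[str]) -> list[str]:
--     ordered = []
--     remaining = list(codes)
--     for item in priority:
--         if item in remaining:
--             ordered.append(item)
--             remaining = [code for code in remaining if code != item]
--     ordered.extend(remaining)
--     return _dedupe(ordered)
-- ===== SOURCE B (Python) =====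
-- def _prioritize_codes(codes: list[str], priority: list[str]) -> list[str]:
--     code_set = set(codes)
--     head = []
--     head_seen = set()
--     for p in priority:
--         if p and p in code_set and p not in head_seen:
--             head_seen.add(p)
--             head.append(p)
--     tail = []
--     seen = set(head_seen)
--     for c in codes:
--         if c and c not in seen:
--             seen.add(c)
--             tail.append(c)
--     return head + tail
-- ===== Notes on version B (the rewrite author's own statement) =====
-- stated objective: faster
-- what changed: Replaces A's shrinking-`remaining` selection loop (a membership scan and full list rebuild per priority item) and the trailing _dedupe helper by two independent set-guarded passes: collect the distinct non-empty priority codes present in a codes set, then the remaining first occurrences of codes, and concatenate.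
import Mathlib
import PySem

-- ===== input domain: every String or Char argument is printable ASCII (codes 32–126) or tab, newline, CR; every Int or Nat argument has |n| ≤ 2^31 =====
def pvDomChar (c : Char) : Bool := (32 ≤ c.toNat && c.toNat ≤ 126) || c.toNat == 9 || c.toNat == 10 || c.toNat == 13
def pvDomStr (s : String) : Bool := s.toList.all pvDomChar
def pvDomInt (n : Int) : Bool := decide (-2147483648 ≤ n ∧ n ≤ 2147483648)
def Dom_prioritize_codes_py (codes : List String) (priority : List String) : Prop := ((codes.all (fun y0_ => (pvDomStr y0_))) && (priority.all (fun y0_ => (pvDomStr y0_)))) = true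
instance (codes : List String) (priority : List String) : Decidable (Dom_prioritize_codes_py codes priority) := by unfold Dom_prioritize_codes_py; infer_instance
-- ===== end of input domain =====

-- B replaces A's shrinking-`remaining` selection loop (and trailing dedupe helper) by two
-- independent set-guarded passes — priority picks, then first occurrences of the rest (objective: simpler).

-- ===== PORT A =====
-- _dedupe's loop: state (seen, result)
def pvDedupeLoop : List String → PySem.Set String → List String → List String
  | [], _, result => result
  | item :: rest, seen, result =>
    if item = "" ∨ item ∈ seen then pvDedupeLoop rest seen result
    else pvDedupeLoop rest (PySem.Set.add seen item) (result ++ [item])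

def pvDedupe (items : List String) : List String := pvDedupeLoop items PySem.Set.empty []

-- the priority loop: state (ordered, remaining)
def pvPrioLoop : List String → List String → List String → List String × List String
  | [], ordered, remaining => (ordered, remaining)
  | item :: rest, ordered, remaining =>
    if item ∈ remaining then
      pvPrioLoop rest (ordered ++ [item]) (remaining.filter (fun c => decide (c ≠ item)))
    else pvPrioLoop rest ordered remaining

def prioritize_codes_py (codes : List String) (priority : List String) : List String :=
  let or := pvPrioLoop priority [] codes
  pvDedupe (or.1 ++ or.2)

-- ===== PORT B =====
-- head loop: state (head_seen, head)
def pvHeadLoop (cs : PySem.Set String) : List String → PySem.Set String → List String → PySem.Set String × List String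
  | [], seen, head => (seen, head)
  | p :: rest, seen, head =>
    if p ≠ "" ∧ p ∈ cs ∧ p ∉ seen then pvHeadLoop cs rest (PySem.Set.add seen p) (head ++ [p])
    else pvHeadLoop cs rest seen head

-- tail loop: state (seen, tail)
def pvTailLoop : List String → PySem.Set String → List String → List String
  | [], _, tail => tail
  | c :: rest, seen, tail =>
    if c ≠ "" ∧ c ∉ seen then pvTailLoop rest (PySem.Set.add seen c) (tail ++ [c])
    else pvTailLoop rest seen tail

def prioritize_codes_py_alt (codes : List String) (priority : List String) : List String :=
  let cs := PySem.Set.ofList codes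
  let sh := pvHeadLoop cs priority PySem.Set.empty []
  let tail := pvTailLoop codes (PySem.Set.ofList sh.1) []
  sh.2 ++ tail

-- ===== PRECONDITION & SPEC =====
def Spec_prioritize_codes_py (codes : List String) (priority : List String) (out : List String) : Prop := out = prioritize_codes_py_alt codes priority
instance (codes : List String) (priority : List String) (out : List String) : Decidable (Spec_prioritize_codes_py codes priority out) := by unfold Spec_prioritize_codes_py; infer_instance

-- ===== CLAIM (what is proved, stated in full; the proofs are below) =====
def Claim_equal_prioritize_codes_py : Prop := ∀ (codes : List String) (priority : List String), Dom_prioritize_codes_py codes priority → Spec_prioritize_codes_py codes priority (prioritize_codes_py codes priority)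

-- ===== LEMMAS AND PROOFS =====

-- accumulator-free forms of the four loops
def pvPick : List String → List String → List String
  | [], _ => []
  | p :: P, r => if p ∈ r then p :: pvPick P (r.filter (fun c => decide (c ≠ p))) else pvPick P r

def pvRem : List String → List String → List String
  | [], r => r
  | p :: P, r => if p ∈ r then pvRem P (r.filter (fun c => decide (c ≠ p))) else pvRem P r

def pvDd : List String → PySem.Set String → List String
  | [], _ => []
  | x :: xs, s => if x = "" ∨ x ∈ s then pvDd xs s else x :: pvDd xs (PySem.Set.add s x)

def pvDdSeen : List String → PySem.Set String → PySem.Set String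
  | [], s => s
  | x :: xs, s => if x = "" ∨ x ∈ s then pvDdSeen xs s else pvDdSeen xs (PySem.Set.add s x)

def pvHPick (cs : PySem.Set String) : List String → PySem.Set String → List String
  | [], _ => []
  | p :: P, seen => if p ≠ "" ∧ p ∈ cs ∧ p ∉ seen then p :: pvHPick cs P (PySem.Set.add seen p) else pvHPick cs P seen

def pvHSeen (cs : PySem.Set String) : List String → PySem.Set String → PySem.Set String
  | [], seen => seen
  | p :: P, seen => if p ≠ "" ∧ p ∈ cs ∧ p ∉ seen then pvHSeen cs P (PySem.Set.add seen p) else pvHSeen cs P seen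

theorem pvPrioLoop_eq (P : List String) : ∀ (o r : List String),
    pvPrioLoop P o r = (o ++ pvPick P r, pvRem P r) := by
  induction P with
  | nil => intro o r; simp [pvPrioLoop, pvPick, pvRem]
  | cons p P ih =>
    intro o r
    by_cases h : p ∈ r <;> simp [pvPrioLoop, pvPick, pvRem, h, ih]

theorem pvDedupeLoop_eq (xs : List String) : ∀ (s : PySem.Set String) (res : List String),
    pvDedupeLoop xs s res = res ++ pvDd xs s := by
  induction xs with
  | nil => intro s res; simp [pvDedupeLoop, pvDd]
  | cons x xs ih =>
    intro s res
    by_cases h : x = "" ∨ x ∈ s <;> simp [pvDedupeLoop, pvDd, h, ih]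

theorem pvHeadLoop_eq (cs : PySem.Set String) (P : List String) :
    ∀ (seen : PySem.Set String) (head : List String),
    pvHeadLoop cs P seen head = (pvHSeen cs P seen, head ++ pvHPick cs P seen) := by
  induction P with
  | nil => intro seen head; simp [pvHeadLoop, pvHSeen, pvHPick]
  | cons p P ih =>
    intro seen head
    by_cases h : p ≠ "" ∧ p ∈ cs ∧ p ∉ seen <;>
      simp [pvHeadLoop, pvHSeen, pvHPick, h, ih]

theorem pvTailLoop_eq (xs : List String) : ∀ (s : PySem.Set String) (t : List String),
    pvTailLoop xs s t = t ++ pvDd xs s := by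
  induction xs with
  | nil => intro s t; simp [pvTailLoop, pvDd]
  | cons x xs ih =>
    intro s t
    by_cases h : x = "" ∨ x ∈ s
    · have h' : ¬ (x ≠ "" ∧ x ∉ s) := by tauto
      simp [pvTailLoop, pvDd, h', ih]
    · have h' : x ≠ "" ∧ x ∉ s := by tauto
      simp [pvTailLoop, pvDd, h', ih]

theorem pvDd_append (l1 : List String) : ∀ (l2 : List String) (s : PySem.Set String),
    pvDd (l1 ++ l2) s = pvDd l1 s ++ pvDd l2 (pvDdSeen l1 s) := by
  induction l1 with
  | nil => intro l2 s; simp [pvDd, pvDdSeen]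
  | cons x xs ih =>
    intro l2 s
    by_cases h : x = "" ∨ x ∈ s <;> simp [pvDd, pvDdSeen, h, ih]

theorem pvMem_ddSeen (l : List String) : ∀ (s : PySem.Set String) (x : String),
    x ∈ pvDdSeen l s ↔ x ∈ s ∨ (x ∈ l ∧ x ≠ "") := by
  induction l with
  | nil => intro s x; simp [pvDdSeen]
  | cons y ys ih =>
    intro s x
    by_cases h : y = "" ∨ y ∈ s
    · simp only [pvDdSeen, if_pos h, ih]
      constructor
      · rintro (hs | hm) <;> [left; right] <;> simp_all
      · rintro (hs | ⟨hm, hne⟩)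
        · exact Or.inl hs
        · rcases List.mem_cons.mp hm with rfl | hm'
          · rcases h with h | h
            · exact absurd h hne
            · exact Or.inl h
          · exact Or.inr ⟨hm', hne⟩
    · push Not at h
      simp only [pvDdSeen, if_neg (by tauto : ¬ (y = "" ∨ y ∈ s)), ih, PySem.Set.mem_add]
      constructor
      · rintro ((hs | rfl) | hm)
        · exact Or.inl hs
        · exact Or.inr ⟨List.mem_cons_self, h.1⟩
        · exact Or.inr ⟨List.mem_cons_of_mem _ hm.1, hm.2⟩
      · rintro (hs | ⟨hm, hne⟩)
        · exact Or.inl (Or.inl hs)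
        · rcases List.mem_cons.mp hm with rfl | hm'
          · exact Or.inl (Or.inr rfl)
          · exact Or.inr ⟨hm', hne⟩

theorem pvDd_congr (l : List String) : ∀ (s s' : PySem.Set String),
    (∀ x, x ∈ s ↔ x ∈ s') → pvDd l s = pvDd l s' := by
  induction l with
  | nil => intro s s' _; simp [pvDd]
  | cons x xs ih =>
    intro s s' hss
    by_cases h : x = "" ∨ x ∈ s
    · have h' : x = "" ∨ x ∈ s' := Or.imp id ((hss x).mp) h
      simp [pvDd, h, h', ih _ _ hss]
    · have h' : ¬ (x = "" ∨ x ∈ s') := fun hh => h (Or.imp id ((hss x).mpr) hh)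
      have hadd : ∀ y, y ∈ PySem.Set.add s x ↔ y ∈ PySem.Set.add s' x := by
        intro y; simp [PySem.Set.mem_add, hss y]
      simp [pvDd, h, h', ih _ _ hadd]

theorem pvDd_nodup (l : List String) : ∀ (s : PySem.Set String), l.Nodup → (∀ x ∈ l, x ∉ s) →
    pvDd l s = l.filter (fun x => decide (x ≠ "")) := by
  induction l with
  | nil => intro s _ _; simp [pvDd]
  | cons x xs ih =>
    intro s hnd hnot
    rcases List.nodup_cons.mp hnd with ⟨hxxs, hnd'⟩
    by_cases hx : x = ""
    · have : x = "" ∨ x ∈ s := Or.inl hx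
      simp only [pvDd, if_pos this]
      rw [ih s hnd' (fun y hy => hnot y (List.mem_cons_of_mem _ hy))]
      simp [hx]
    · have hns : x ∉ s := hnot x List.mem_cons_self
      have : ¬ (x = "" ∨ x ∈ s) := by tauto
      simp only [pvDd, if_neg this]
      rw [ih (PySem.Set.add s x) hnd' ?_]
      · simp [hx]
      · intro y hy
        rw [PySem.Set.mem_add]
        rintro (hys | rfl)
        · exact hnot y (List.mem_cons_of_mem _ hy) hys
        · exact hxxs hy

theorem pvPick_sub (P : List String) : ∀ (r : List String) (x : String), x ∈ pvPick P r → x ∈ r := by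
  induction P with
  | nil => intro r x h; simp [pvPick] at h
  | cons p P ih =>
    intro r x h
    by_cases hp : p ∈ r
    · simp only [pvPick, if_pos hp, List.mem_cons] at h
      rcases h with rfl | h
      · exact hp
      · exact (List.mem_filter.mp (ih _ _ h)).1
    · simp only [pvPick, if_neg hp] at h
      exact ih _ _ h

theorem pvPick_nodup (P : List String) : ∀ (r : List String), (pvPick P r).Nodup := by
  induction P with
  | nil => intro r; simp [pvPick]
  | cons p P ih =>
    intro r
    by_cases hp : p ∈ r
    · simp only [pvPick, if_pos hp]
      refine List.nodup_cons.mpr ⟨?_, ih _⟩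
      intro hmem
      have := pvPick_sub P _ p hmem
      simp [List.mem_filter] at this
    · simp only [pvPick, if_neg hp]; exact ih _

theorem pvRem_eq_filter (P : List String) : ∀ (r : List String),
    pvRem P r = r.filter (fun c => decide (c ∉ pvPick P r)) := by
  induction P with
  | nil => intro r; simp [pvRem, pvPick]
  | cons p P ih =>
    intro r
    by_cases hp : p ∈ r
    · simp only [pvRem, pvPick, if_pos hp]
      rw [ih]
      rw [List.filter_filter]
      apply List.filter_congr
      intro c _
      by_cases hcp : c = p <;> simp [hcp]
    · simp only [pvRem, pvPick, if_neg hp]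
      exact ih r

theorem pvDd_filter_skip (l : List String) : ∀ (S : List String) (s : PySem.Set String),
    (∀ x ∈ S, x = "" ∨ x ∈ s) →
    pvDd (l.filter (fun c => decide (c ∉ S))) s = pvDd l s := by
  induction l with
  | nil => intro S s _; simp
  | cons x xs ih =>
    intro S s hS
    by_cases hxS : x ∈ S
    · have hx : x = "" ∨ x ∈ s := hS x hxS
      simp only [List.filter_cons, decide_eq_true_eq]
      rw [if_neg (by simp [hxS])]
      rw [ih S s hS]
      simp [pvDd, hx]
    · simp only [List.filter_cons, decide_eq_true_eq]
      rw [if_pos (by simp [hxS])]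
      by_cases hx : x = "" ∨ x ∈ s
      · simp only [pvDd, if_pos hx]; exact ih S s hS
      · simp only [pvDd, if_neg hx]
        rw [ih S (PySem.Set.add s x) ?_]
        intro y hy
        rcases hS y hy with h | h
        · exact Or.inl h
        · exact Or.inr (by rw [PySem.Set.mem_add]; exact Or.inl h)

theorem pvMem_hSeen (cs : PySem.Set String) (P : List String) :
    ∀ (seen : PySem.Set String) (x : String),
    x ∈ pvHSeen cs P seen ↔ x ∈ seen ∨ x ∈ pvHPick cs P seen := by
  induction P with
  | nil => intro seen x; simp [pvHSeen, pvHPick]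
  | cons p P ih =>
    intro seen x
    by_cases h : p ≠ "" ∧ p ∈ cs ∧ p ∉ seen
    · simp only [pvHSeen, pvHPick, if_pos h, ih, PySem.Set.mem_add, List.mem_cons]
      tauto
    · simp only [pvHSeen, pvHPick, if_neg h, ih]

-- the core correspondence: A's picks (empties dropped) are B's head picks
theorem pvCore (cs : PySem.Set String) (P : List String) :
    ∀ (r : List String) (seen : PySem.Set String),
    (∀ x, x ≠ "" → (x ∈ r ↔ x ∈ cs ∧ x ∉ seen)) →
    (pvPick P r).filter (fun x => decide (x ≠ "")) = pvHPick cs P seen := by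
  induction P with
  | nil => intro r seen _; simp [pvPick, pvHPick]
  | cons p P ih =>
    intro r seen hinv
    by_cases hp : p = ""
    · subst hp
      have hcond : ¬ ((("" : String) ≠ "") ∧ ("" : String) ∈ cs ∧ ("" : String) ∉ seen) := by simp
      simp only [pvHPick, if_neg hcond]
      by_cases hr : ("" : String) ∈ r
      · simp only [pvPick, if_pos hr, List.filter_cons]
        rw [if_neg (by simp)]
        apply ih
        intro x hx
        rw [List.mem_filter]
        simp only [decide_eq_true_eq]
        constructor
        · rintro ⟨hxr, _⟩; exact (hinv x hx).mp hxr
        · intro h; exact ⟨(hinv x hx).mpr h, by simpa using hx⟩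
      · simp only [pvPick, if_neg hr]
        exact ih r seen hinv
    · by_cases hc : p ∈ cs ∧ p ∉ seen
      · have hcond : p ≠ "" ∧ p ∈ cs ∧ p ∉ seen := ⟨hp, hc⟩
        have hpr : p ∈ r := (hinv p hp).mpr hc
        simp only [pvPick, pvHPick, if_pos hpr, if_pos hcond, List.filter_cons]
        rw [if_pos (by simpa using hp)]
        congr 1
        apply ih
        intro x hx
        rw [List.mem_filter, PySem.Set.mem_add]
        simp only [decide_eq_true_eq]
        constructor
        · rintro ⟨hxr, hxp⟩
          have hmm := (hinv x hx).mp hxr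
          refine ⟨hmm.1, ?_⟩
          rintro (h | rfl)
          · exact hmm.2 h
          · exact hxp rfl
        · rintro ⟨hxc, hxn⟩
          have hxs : x ∉ seen := fun h => hxn (Or.inl h)
          have hxp : x ≠ p := fun h => hxn (Or.inr h)
          exact ⟨(hinv x hx).mpr ⟨hxc, hxs⟩, hxp⟩
      · have hcond : ¬ (p ≠ "" ∧ p ∈ cs ∧ p ∉ seen) := by tauto
        have hpr : p ∉ r := fun h => hc ((hinv p hp).mp h)
        simp only [pvPick, pvHPick, if_neg hpr, if_neg hcond]
        exact ih r seen hinv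

-- ===== VERDICT (by name: the statement is the Claim_ definition above) =====
theorem prioritize_codes_py_spec : Claim_equal_prioritize_codes_py := by
  intro codes priority _
  unfold Spec_prioritize_codes_py prioritize_codes_py prioritize_codes_py_alt
  simp only [pvPrioLoop_eq, pvHeadLoop_eq, pvTailLoop_eq, List.nil_append]
  unfold pvDedupe
  rw [pvDedupeLoop_eq, List.nil_append, pvDd_append]
  set cs := PySem.Set.ofList codes with hcs
  have hinv : ∀ x : String, x ≠ "" → (x ∈ codes ↔ x ∈ cs ∧ x ∉ PySem.Set.empty) := by
    intro x _
    simp [hcs, PySem.Set.mem_ofList, PySem.Set.empty]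
  have hhead : (pvPick priority codes).filter (fun x => decide (x ≠ "")) =
      pvHPick cs priority PySem.Set.empty := pvCore cs priority codes PySem.Set.empty hinv
  have h1 : pvDd (pvPick priority codes) PySem.Set.empty = pvHPick cs priority PySem.Set.empty := by
    rw [pvDd_nodup _ _ (pvPick_nodup priority codes) (by intro x _; simp [PySem.Set.empty])]
    exact hhead
  have h2 : pvDd (pvRem priority codes) (pvDdSeen (pvPick priority codes) PySem.Set.empty) =
      pvDd codes (PySem.Set.ofList (pvHSeen cs priority PySem.Set.empty)) := by
    rw [pvRem_eq_filter]
    rw [pvDd_filter_skip codes (pvPick priority codes) _ ?_]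
    · apply pvDd_congr
      intro x
      rw [pvMem_ddSeen, PySem.Set.mem_ofList, pvMem_hSeen]
      constructor
      · rintro (h | ⟨hm, hne⟩)
        · simp [PySem.Set.empty] at h
        · right
          rw [← hhead] at *
          exact List.mem_filter.mpr ⟨hm, by simpa using hne⟩
      · rintro (h | h)
        · simp [PySem.Set.empty] at h
        · rw [← hhead] at h
          rcases List.mem_filter.mp h with ⟨hm, hne⟩
          exact Or.inr ⟨hm, by simpa using hne⟩
    · intro x hx
      by_cases hxe : x = ""
      · exact Or.inl hxe
      · exact Or.inr ((pvMem_ddSeen _ _ _).mpr (Or.inr ⟨hx, hxe⟩))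
  rw [h1, h2]
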